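-- pv_equiv track=rewrite | github.com/jiazj-jiazj/Codec_Gen | egs/libritts/bin/combine_ar_nar_vc_dir_onlyar.py | get_non_lcs_tokens
-- ===== SOURCE A (Python) =====
-- def depup(semantic_token):
--     unique_tokens = []
--     for token in semantic_token:
--         if unique_tokens==[] or token != unique_tokens[-1]:
--             unique_tokens.append(token)
--     return unique_tokens
--
-- def get_non_lcs_tokens(a, lcs_ab):
--     lcs_index = 0
--     non_lcs_tokens = []
--     updated_tokens = []
--     ll = len(a)
--     i=0
--     while True:
--         if i==ll:
--             break
--         if lcs_index < len(lcs_ab) and a[i] == lcs_ab[lcs_index]: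
--             i+=1
--             while i<ll and a[i]==lcs_ab[lcs_index]:
--                 i+=1
--             lcs_index += 1
--
--             i-=1
--         else:
--             non_lcs_tokens+=[a[i]]
--         i+=1
--
--     lcs_index = 0
--     depup_non_lcs_tokens = depup(non_lcs_tokens)
--
--     non_lcs_token_counts = [0 for xx in range(len(depup_non_lcs_tokens))]
--
--     index = 0
--     ll = len(non_lcs_tokens)
--     i=0
--     while True:
--         if i==ll:
--             break
--         if index < len(depup_non_lcs_tokens) and non_lcs_tokens[i] == depup_non_lcs_tokens[index]:
--             i+=1
--             non_lcs_token_counts[index]+=1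
--
--             while i<ll and non_lcs_tokens[i]==depup_non_lcs_tokens[index] :
--                 non_lcs_token_counts[index]+=1
--                 i+=1
--             index += 1
--             i-=1
--         i+=1
--
--
--     return depup_non_lcs_tokens, non_lcs_token_counts
-- ===== SOURCE B (Python) =====
-- def runs(xs):
--     """Run-length encode xs into a list of (value, count) pairs, one pass."""
--     res = []
--     for x in xs:
--         if res and res[-1][0] == x:
--             res[-1] = (x, res[-1][1] + 1)
--         else:
--             res.append((x, 1))
--     return res
--
-- def get_non_lcs_tokens(a, lcs_ab):
--     lcs_index = 0
--     non_lcs = []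
--     for value, count in runs(a):
--         if lcs_index < len(lcs_ab) and value == lcs_ab[lcs_index]:
--             lcs_index += 1
--         else:
--             non_lcs += [value] * count
--     r = runs(non_lcs)
--     return [v for v, _ in r], [c for _, c in r]
-- ===== Notes on version B (the rewrite author's own statement) =====
-- stated objective: simpler
-- what changed: Replaces A's two index-walking while-loop passes (manual inner run-consuming loops, depup + a counting pass over a preallocated zero array) by one run-length-encoding helper used twice: phase 1 skips or emits whole (value, count) runs of a while advancing lcs_index, and phase 2 reads the result values and counts directly off the runs of the residue.
import Mathlib
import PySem

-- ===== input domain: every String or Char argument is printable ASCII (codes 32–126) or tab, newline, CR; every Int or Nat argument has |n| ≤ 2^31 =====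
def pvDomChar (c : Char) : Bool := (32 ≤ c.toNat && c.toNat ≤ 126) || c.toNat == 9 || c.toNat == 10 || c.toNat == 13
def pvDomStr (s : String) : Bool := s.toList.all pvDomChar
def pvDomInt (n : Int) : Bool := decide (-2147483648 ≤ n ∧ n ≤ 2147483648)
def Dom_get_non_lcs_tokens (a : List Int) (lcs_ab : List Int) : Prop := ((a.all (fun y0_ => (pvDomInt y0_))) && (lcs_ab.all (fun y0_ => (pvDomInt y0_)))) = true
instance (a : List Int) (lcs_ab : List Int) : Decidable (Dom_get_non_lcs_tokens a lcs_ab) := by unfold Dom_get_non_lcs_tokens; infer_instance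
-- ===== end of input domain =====

-- B replaces A's two index-walking while-loop passes by a single run-length
-- encoding helper used for both phases (skip/emit whole runs, then read the
-- values and counts straight off the runs of the residue); objective: simpler.

-- ===== PORT A =====
-- Python A's index i is carried as the remaining suffix of the traversed list
-- (each loop reads only position i and moves right), which is the structural
-- recursion form of the same while-loops.

-- inner `while i<ll and a[i]==lcs_ab[lcs_index]: i+=1` of phase 1
def pvAInner1 (v : Int) : List Int → List Int
  | [] => []
  | x :: xs => if x = v then pvAInner1 v xs else x :: xs

theorem pvAInner1_length_le (v : Int) (xs : List Int) :
    (pvAInner1 v xs).length ≤ xs.length := by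
  induction xs with
  | nil => simp [pvAInner1]
  | cons x xs ih =>
    simp only [pvAInner1]
    split
    · exact Nat.le_succ_of_le ih
    · simp

-- outer phase-1 while-loop of A
def pvALoop1 (lcs_ab : List Int) (xs : List Int) (li : Nat) (non : List Int) : List Int :=
  match xs with
  | [] => non
  | x :: rest =>
    if li < lcs_ab.length ∧ x = lcs_ab.getD li 0 then
      pvALoop1 lcs_ab (pvAInner1 (lcs_ab.getD li 0) rest) (li + 1) non
    else
      pvALoop1 lcs_ab rest li (non ++ [x])
termination_by xs.length
decreasing_by
  · exact Nat.lt_succ_of_le (pvAInner1_length_le _ _)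
  · simp

-- Python `depup` (foldl over the tokens, u[-1] read as u.getD (u.length-1))
def pvDepupStep (u : List Int) (token : Int) : List Int :=
  if u = [] ∨ token ≠ u.getD (u.length - 1) 0 then u ++ [token] else u

def depup (semantic_token : List Int) : List Int :=
  semantic_token.foldl pvDepupStep []

-- inner `while i<ll and non_lcs_tokens[i]==dep[index]: counts[index]+=1; i+=1`
def pvAInner2 (v : Int) (index : Nat) (xs : List Int) (counts : List Int) :
    List Int × List Int :=
  match xs with
  | [] => ([], counts)
  | x :: rest =>
    if x = v then
      pvAInner2 v index rest (counts.set index (counts.getD index 0 + 1))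
    else (x :: rest, counts)

theorem pvAInner2_fst_length_le (v : Int) (index : Nat) (xs : List Int) :
    ∀ counts, (pvAInner2 v index xs counts).1.length ≤ xs.length := by
  induction xs with
  | nil => intro counts; simp [pvAInner2]
  | cons x rest ih =>
    intro counts
    simp only [pvAInner2]
    split
    · exact Nat.le_succ_of_le (ih _)
    · simp

-- outer phase-2 while-loop of A
def pvALoop2 (dep : List Int) (xs : List Int) (index : Nat) (counts : List Int) : List Int :=
  match xs with
  | [] => counts
  | x :: rest =>
    if index < dep.length ∧ x = dep.getD index 0 then
      let counts1 := counts.set index (counts.getD index 0 + 1)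
      let p := pvAInner2 (dep.getD index 0) index rest counts1
      pvALoop2 dep p.1 (index + 1) p.2
    else
      pvALoop2 dep rest index counts
termination_by xs.length
decreasing_by
  · exact Nat.lt_succ_of_le (pvAInner2_fst_length_le _ _ _ _)
  · simp

def get_non_lcs_tokens (a : List Int) (lcs_ab : List Int) : List Int × List Int :=
  let non_lcs_tokens := pvALoop1 lcs_ab a 0 []
  let depup_non_lcs_tokens := depup non_lcs_tokens
  let non_lcs_token_counts := List.replicate depup_non_lcs_tokens.length (0 : Int)
  (depup_non_lcs_tokens, pvALoop2 depup_non_lcs_tokens non_lcs_tokens 0 non_lcs_token_counts)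

-- ===== PORT B =====
-- Source B's `runs`: one fold, extending or appending the last (value, count) pair
def pvRunsStep (res : List (Int × Int)) (x : Int) : List (Int × Int) :=
  match res.getLast? with
  | some (v, c) => if v = x then res.dropLast ++ [(x, c + 1)] else res ++ [(x, 1)]
  | none => res ++ [(x, 1)]

def pvRuns (xs : List Int) : List (Int × Int) := xs.foldl pvRunsStep []

def get_non_lcs_tokens_alt (a : List Int) (lcs_ab : List Int) : List Int × List Int :=
  let st :=
    (pvRuns a).foldl
      (fun (st : Nat × List Int) vc =>
        if st.1 < lcs_ab.length ∧ vc.1 = lcs_ab.getD st.1 0 then (st.1 + 1, st.2)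
        else (st.1, st.2 ++ List.replicate vc.2.toNat vc.1))
      (0, [])
  let r := pvRuns st.2
  (r.map Prod.fst, r.map Prod.snd)

-- ===== PRECONDITION & SPEC =====
def Spec_get_non_lcs_tokens (a : List Int) (lcs_ab : List Int) (out : List Int × List Int) : Prop := out = get_non_lcs_tokens_alt a lcs_ab
instance (a : List Int) (lcs_ab : List Int) (out : List Int × List Int) : Decidable (Spec_get_non_lcs_tokens a lcs_ab out) := by unfold Spec_get_non_lcs_tokens; infer_instance

-- ===== CLAIM (what is proved, stated in full; the proofs are below) =====
def Claim_equal_get_non_lcs_tokens : Prop := ∀ (a : List Int) (lcs_ab : List Int), Dom_get_non_lcs_tokens a lcs_ab → Spec_get_non_lcs_tokens a lcs_ab (get_non_lcs_tokens a lcs_ab)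

-- ===== LEMMAS AND PROOFS =====

theorem pvRunsStep_ne_nil (res : List (Int × Int)) (x : Int) : pvRunsStep res x ≠ [] := by
  unfold pvRunsStep
  split
  · split <;> simp
  · simp


theorem pvRunsStep_append (pre l : List (Int × Int)) (x : Int) (hl : l ≠ []) :
    pvRunsStep (pre ++ l) x = pre ++ pvRunsStep l x := by
  obtain ⟨m, p, rfl⟩ := (List.eq_nil_or_concat l).resolve_left hl
  obtain ⟨v, c⟩ := p
  unfold pvRunsStep
  simp only [List.concat_eq_append, ← List.append_assoc]
  simp only [List.getLast?_concat, List.dropLast_concat]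
  split <;> simp


theorem foldl_pvRunsStep_append (xs : List Int) :
    ∀ (pre l : List (Int × Int)), l ≠ [] →
      List.foldl pvRunsStep (pre ++ l) xs = pre ++ List.foldl pvRunsStep l xs := by
  induction xs with
  | nil => intro pre l hl; simp
  | cons x xs ih =>
    intro pre l hl
    simp only [List.foldl_cons]
    rw [pvRunsStep_append pre l x hl, ih pre (pvRunsStep l x) (pvRunsStep_ne_nil l x)]


theorem foldl_pvRunsStep_single (xs : List Int) :
    ∀ (v c : Int),
      List.foldl pvRunsStep [(v, c)] xs
        = (v, c + ((xs.takeWhile (fun y => y = v)).length : Int))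
            :: pvRuns (xs.dropWhile (fun y => y = v)) := by
  induction xs with
  | nil => intro v c; simp [pvRuns]
  | cons y ys ih =>
    intro v c
    by_cases h : y = v
    · have hstep : pvRunsStep [(v, c)] y = [(v, c + 1)] := by
        simp [pvRunsStep, h]
      simp only [List.foldl_cons, hstep, ih v (c + 1)]
      simp only [List.takeWhile_cons, List.dropWhile_cons, h, decide_true]
      simp only [if_true, List.length_cons, List.cons.injEq, Prod.mk.injEq]
      exact ⟨⟨trivial, by push_cast; ring⟩, trivial⟩
    · have hstep : pvRunsStep [(v, c)] y = [(v, c)] ++ [(y, 1)] := by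
        have h' : ¬ v = y := fun e => h e.symm
        simp [pvRunsStep, h']
      simp only [List.foldl_cons, hstep]
      rw [foldl_pvRunsStep_append ys [(v, c)] [(y, 1)] (by simp)]
      have hr : pvRuns (y :: ys) = List.foldl pvRunsStep [(y, 1)] ys := by
        simp [pvRuns, pvRunsStep]
      simp [h, hr]


theorem pvRuns_cons (x : Int) (xs : List Int) :
    pvRuns (x :: xs)
      = (x, 1 + ((xs.takeWhile (fun y => y = x)).length : Int))
          :: pvRuns (xs.dropWhile (fun y => y = x)) := by
  have : pvRuns (x :: xs) = List.foldl pvRunsStep [(x, 1)] xs := by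
    simp [pvRuns, pvRunsStep]
  rw [this, foldl_pvRunsStep_single]


theorem head?_dropWhile_false {p : Int → Bool} (l : List Int) {z : Int}
    (h : (l.dropWhile p).head? = some z) : p z = false := by
  induction l with
  | nil => simp at h
  | cons x xs ih =>
    rw [List.dropWhile_cons] at h
    split at h
    · exact ih h
    · simp_all


-- phase 1
theorem pvAInner1_eq_dropWhile (v : Int) (xs : List Int) :
    pvAInner1 v xs = xs.dropWhile (fun y => y = v) := by
  induction xs with
  | nil => rfl
  | cons x xs ih =>
    simp only [pvAInner1, List.dropWhile_cons]
    by_cases h : x = v <;> simp [h, ih]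


theorem pvALoop1_emit_run (lcs_ab : List Int) (x : Int) (li : Nat)
    (hne : ¬ (li < lcs_ab.length ∧ x = lcs_ab.getD li 0)) :
    ∀ (pre : List Int), (∀ y ∈ pre, y = x) →
      ∀ rest non, pvALoop1 lcs_ab (pre ++ rest) li non = pvALoop1 lcs_ab rest li (non ++ pre) := by
  intro pre hpre
  induction pre with
  | nil => intro rest non; simp
  | cons y pre ih =>
    intro rest non
    have hy : y = x := hpre y (by simp)
    have hne' : ¬ (li < lcs_ab.length ∧ y = lcs_ab.getD li 0) := by
      rw [hy]; exact hne
    rw [List.cons_append, pvALoop1, if_neg hne',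
      ih (fun z hz => hpre z (by simp [hz])) rest (non ++ [y])]
    simp


theorem pvALoop1_eq_fold (lcs_ab : List Int) (n : Nat) :
    ∀ xs, xs.length ≤ n → ∀ (li : Nat) (non : List Int),
      pvALoop1 lcs_ab xs li non
        = ((pvRuns xs).foldl
            (fun (st : Nat × List Int) vc =>
              if st.1 < lcs_ab.length ∧ vc.1 = lcs_ab.getD st.1 0 then (st.1 + 1, st.2)
              else (st.1, st.2 ++ List.replicate vc.2.toNat vc.1))
            (li, non)).2 := by
  induction n with
  | zero =>
    intro xs hxs li non
    rw [List.length_eq_zero_iff.mp (Nat.le_zero.mp hxs)]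
    simp [pvALoop1, pvRuns]
  | succ n ih =>
    intro xs hxs li non
    match xs with
    | [] => simp [pvALoop1, pvRuns]
    | x :: rest =>
      rw [pvRuns_cons, List.foldl_cons, pvALoop1]
      by_cases hg : li < lcs_ab.length ∧ x = lcs_ab.getD li 0
      · rw [if_pos hg, if_pos hg]
        have hv : lcs_ab.getD li 0 = x := hg.2.symm
        rw [hv, pvAInner1_eq_dropWhile]
        refine ih _ ?_ (li + 1) non
        have hd := List.length_dropWhile_le (fun y : Int => decide (y = x)) rest
        simp only [List.length_cons] at hxs
        omega
      · rw [if_neg hg, if_neg hg]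
        have hsplit :
            List.takeWhile (fun y => y = x) rest ++ List.dropWhile (fun y => y = x) rest
              = rest := List.takeWhile_append_dropWhile
        have hrw :
            pvALoop1 lcs_ab rest li (non ++ [x])
              = pvALoop1 lcs_ab (List.dropWhile (fun y => y = x) rest) li
                  ((non ++ [x]) ++ List.takeWhile (fun y => y = x) rest) := by
          conv_lhs => rw [← hsplit]
          exact pvALoop1_emit_run lcs_ab x li hg
            (List.takeWhile (fun y => y = x) rest)
            (fun y hy => by simpa using List.mem_takeWhile_imp hy)
            (List.dropWhile (fun y => y = x) rest) (non ++ [x])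
        rw [hrw]
        have hrep : List.takeWhile (fun y => y = x) rest
            = List.replicate (List.takeWhile (fun y => y = x) rest).length x :=
          List.eq_replicate_of_mem (fun b hb => by simpa using List.mem_takeWhile_imp hb)
        have htoNat :
            ((1 + ((List.takeWhile (fun y => y = x) rest).length : Int)).toNat)
              = 1 + (List.takeWhile (fun y => y = x) rest).length := by omega
        have hacc : (non ++ [x]) ++ List.takeWhile (fun y => y = x) rest
            = non ++ List.replicate ((1 + ((List.takeWhile (fun y => y = x) rest).length : Int)).toNat) x := by
          rw [htoNat]
          conv_lhs => rw [hrep]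
          rw [Nat.add_comm, List.replicate_succ]
          simp
        rw [hacc]
        refine ih _ ?_ li _
        have hd := List.length_dropWhile_le (fun y : Int => decide (y = x)) rest
        simp only [List.length_cons] at hxs
        omega


-- depup
theorem getD_last_eq (u : List Int) : u.getD (u.length - 1) 0 = u.getLast?.getD 0 := by
  rw [List.getD_eq_getElem?_getD, List.getLast?_eq_getElem?]

theorem pvDepupStep_ne_nil (u : List Int) (t : Int) : pvDepupStep u t ≠ [] := by
  unfold pvDepupStep
  split_ifs with h
  · simp
  · exact fun e => h (Or.inl e)

theorem pvDepupStep_append (pre l : List Int) (t : Int) (hl : l ≠ []) :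
    pvDepupStep (pre ++ l) t = pre ++ pvDepupStep l t := by
  unfold pvDepupStep
  rw [getD_last_eq, getD_last_eq, List.getLast?_append_of_ne_nil _ hl]
  have h1 : ¬ (pre ++ l = []) := by simp [hl]
  simp only [h1, hl, false_or]
  split <;> simp

theorem foldl_pvDepupStep_append (xs : List Int) :
    ∀ (pre l : List Int), l ≠ [] →
      List.foldl pvDepupStep (pre ++ l) xs = pre ++ List.foldl pvDepupStep l xs := by
  induction xs with
  | nil => intro pre l hl; simp
  | cons x xs ih =>
    intro pre l hl
    simp only [List.foldl_cons]
    rw [pvDepupStep_append pre l x hl, ih pre (pvDepupStep l x) (pvDepupStep_ne_nil l x)]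

theorem foldl_pvDepupStep_single (xs : List Int) :
    ∀ v : Int,
      List.foldl pvDepupStep [v] xs = v :: depup (xs.dropWhile (fun y => y = v)) := by
  induction xs with
  | nil => intro v; simp [depup]
  | cons y ys ih =>
    intro v
    by_cases h : y = v
    · subst h
      have hstep : pvDepupStep [y] y = [y] := by
        simp [pvDepupStep]
      simp only [List.foldl_cons, hstep, List.dropWhile_cons, decide_true, if_true, ih y]
    · have hstep : pvDepupStep [v] y = [v] ++ [y] := by
        simp [pvDepupStep, h]
      simp only [List.foldl_cons, hstep]
      rw [foldl_pvDepupStep_append ys [v] [y] (by simp)]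
      have hd : depup (y :: ys) = List.foldl pvDepupStep [y] ys := by
        simp [depup, pvDepupStep]
      simp [h, hd]

theorem depup_cons (x : Int) (xs : List Int) :
    depup (x :: xs) = x :: depup (xs.dropWhile (fun y => y = x)) := by
  have : depup (x :: xs) = List.foldl pvDepupStep [x] xs := by
    simp [depup, pvDepupStep]
  rw [this, foldl_pvDepupStep_single]


theorem depup_eq_runs_fst (n : Nat) :
    ∀ xs : List Int, xs.length ≤ n → depup xs = (pvRuns xs).map Prod.fst := by
  induction n with
  | zero =>
    intro xs hxs
    rw [List.length_eq_zero_iff.mp (Nat.le_zero.mp hxs)]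
    simp [depup, pvRuns]
  | succ n ih =>
    intro xs hxs
    match xs with
    | [] => simp [depup, pvRuns]
    | x :: rest =>
      rw [depup_cons, pvRuns_cons, List.map_cons]
      have hd := List.length_dropWhile_le (fun y : Int => decide (y = x)) rest
      simp only [List.length_cons] at hxs
      rw [ih _ (by omega)]


-- phase 2
theorem set_getD_zero (counts : List Int) (i : Nat) :
    counts.set i (counts.getD i 0 + 0) = counts := by
  by_cases h : i < counts.length
  · rw [Int.add_zero, List.getD_eq_getElem?_getD, List.getElem?_eq_getElem h]
    exact List.set_getElem_self h
  · exact List.set_eq_of_length_le (Nat.le_of_not_lt h)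

theorem set_getD_add (counts : List Int) (i : Nat) (k1 k2 : Int) :
    (counts.set i (counts.getD i 0 + k1)).set i
        ((counts.set i (counts.getD i 0 + k1)).getD i 0 + k2)
      = counts.set i (counts.getD i 0 + (k1 + k2)) := by
  by_cases h : i < counts.length
  · have hin : (counts.set i (counts.getD i 0 + k1)).getD i 0 = counts.getD i 0 + k1 := by
      rw [List.getD_eq_getElem?_getD, List.getElem?_set_self (by simpa using h), Option.getD_some]
    rw [hin, List.set_set, Int.add_assoc]
  · rw [List.set_eq_of_length_le (Nat.le_of_not_lt h),
      List.set_eq_of_length_le (Nat.le_of_not_lt h),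
      List.set_eq_of_length_le (Nat.le_of_not_lt h)]

theorem pvAInner2_run (v : Int) (index : Nat) :
    ∀ (pre : List Int), (∀ y ∈ pre, y = v) →
      ∀ rest counts, (∀ z, rest.head? = some z → z ≠ v) →
        pvAInner2 v index (pre ++ rest) counts
          = (rest, counts.set index (counts.getD index 0 + pre.length)) := by
  intro pre hpre
  induction pre with
  | nil =>
    intro rest counts hrest
    rw [List.nil_append, List.length_nil, Nat.cast_zero, set_getD_zero]
    match rest with
    | [] => rfl
    | z :: zs =>
      have hz : z ≠ v := hrest z rfl
      simp [pvAInner2, hz]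
  | cons y pre ih =>
    intro rest counts hrest
    have hy : y = v := hpre y (by simp)
    rw [List.cons_append]
    show pvAInner2 v index (y :: (pre ++ rest)) counts = _
    rw [pvAInner2, if_pos hy]
    rw [ih (fun z hz => hpre z (by simp [hz])) rest _ hrest]
    rw [set_getD_add]
    congr 2
    simp only [List.length_cons]
    push_cast
    ring


theorem pvALoop2_eq_runs_snd (dep : List Int) (n : Nat) :
    ∀ xs : List Int, xs.length ≤ n → ∀ cdone : List Int,
      dep.drop cdone.length = (pvRuns xs).map Prod.fst →
      pvALoop2 dep xs cdone.length (cdone ++ List.replicate (pvRuns xs).length (0 : Int))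
        = cdone ++ (pvRuns xs).map Prod.snd := by
  induction n with
  | zero =>
    intro xs hxs cdone hdrop
    rw [List.length_eq_zero_iff.mp (Nat.le_zero.mp hxs)]
    simp [pvALoop2, pvRuns]
  | succ n ih =>
    intro xs hxs cdone hdrop
    match xs with
    | [] => simp [pvALoop2, pvRuns]
    | x :: rest =>
      rw [pvRuns_cons] at hdrop ⊢
      set t := (List.takeWhile (fun y => y = x) rest).length with ht
      set rd := List.dropWhile (fun y => y = x) rest with hrd
      simp only [List.map_cons, List.length_cons] at hdrop ⊢
      -- dep[cdone.length] = x, and cdone.length < dep.length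
      have hget : dep[cdone.length]? = some x := by
        rw [← List.head?_drop, hdrop]
        rfl
      have hlt : cdone.length < dep.length :=
        (List.getElem?_eq_some_iff.mp hget).1
      have hgetD : dep.getD cdone.length 0 = x := by
        rw [List.getD_eq_getElem?_getD, hget]; rfl
      rw [pvALoop2, if_pos ⟨hlt, hgetD.symm⟩]
      -- the counts list: cdone ++ 0 :: replicate _ 0
      rw [List.replicate_succ]
      have hcget : (cdone ++ (0 : Int) :: List.replicate (pvRuns rd).length 0).getD
          cdone.length 0 = 0 := by
        rw [List.getD_eq_getElem?_getD,
          List.getElem?_append_right (Nat.le_refl _), Nat.sub_self]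
        rfl
      have hcset : ∀ w : Int,
          (cdone ++ (0 : Int) :: List.replicate (pvRuns rd).length 0).set cdone.length w
            = cdone ++ w :: List.replicate (pvRuns rd).length 0 := by
        intro w
        rw [List.set_append, if_neg (by omega), Nat.sub_self]
        rfl
      rw [hcget, hcset, Int.zero_add]
      -- run the inner while over the leading x-run
      have hsplit : List.takeWhile (fun y => y = x) rest ++ rd = rest :=
        List.takeWhile_append_dropWhile
      have hinner := pvAInner2_run x cdone.length
        (List.takeWhile (fun y => y = x) rest)
        (fun y hy => by simpa using List.mem_takeWhile_imp hy)
        rd (cdone ++ (1 : Int) :: List.replicate (pvRuns rd).length 0)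
        (fun z hz => by
          have := head?_dropWhile_false (p := fun y => y = x) rest (by rw [← hrd, hz])
          simpa using this)
      rw [hsplit] at hinner
      rw [hgetD]
      simp only [hinner]
      have hc1 : (cdone ++ (1 : Int) :: List.replicate (pvRuns rd).length 0).getD
          cdone.length 0 = 1 := by
        rw [List.getD_eq_getElem?_getD,
          List.getElem?_append_right (Nat.le_refl _), Nat.sub_self]
        rfl
      have hcset1 : ∀ w : Int,
          (cdone ++ (1 : Int) :: List.replicate (pvRuns rd).length 0).set cdone.length w
            = cdone ++ w :: List.replicate (pvRuns rd).length 0 := by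
        intro w
        rw [List.set_append, if_neg (by omega), Nat.sub_self]
        rfl
      rw [hc1, hcset1]
      have hdrop' : List.drop (cdone.length + 1) dep = List.map Prod.fst (pvRuns rd) := by
        have h1 : List.drop (cdone.length + 1) dep
            = List.drop 1 (List.drop cdone.length dep) := by
          rw [List.drop_drop]
        rw [h1, hdrop]
        rfl
      have hlen : rd.length ≤ n := by
        have hdw := List.length_dropWhile_le (fun y : Int => decide (y = x)) rest
        rw [← hrd] at hdw
        simp only [List.length_cons] at hxs
        omega
      have hih := ih rd hlen (cdone ++ [1 + (t : Int)])
        (by simpa using hdrop')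
      simpa [List.append_assoc] using hih

-- ===== VERDICT (by name: the statement is the Claim_ definition above) =====
theorem get_non_lcs_tokens_spec : Claim_equal_get_non_lcs_tokens := by
  intro a lcs_ab _
  unfold Spec_get_non_lcs_tokens
  show get_non_lcs_tokens a lcs_ab = get_non_lcs_tokens_alt a lcs_ab
  simp only [get_non_lcs_tokens, get_non_lcs_tokens_alt]
  rw [← pvALoop1_eq_fold lcs_ab a.length a le_rfl 0 []]
  set non := pvALoop1 lcs_ab a 0 [] with hnon
  have hdep := depup_eq_runs_fst non.length non le_rfl
  have hlen : (depup non).length = (pvRuns non).length := by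
    rw [hdep, List.length_map]
  have h2 := pvALoop2_eq_runs_snd (depup non) non.length non le_rfl []
    (by simpa using hdep)
  simp only [List.length_nil, List.nil_append] at h2
  rw [hlen, h2, hdep]
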